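-- pv_equiv track=rewrite | github.com/ADivassonJ/CogniCity | codes/subcodes/Tests/Mapa de calor - Domestico + movilidad.py | build_children_and_postorder
-- ===== SOURCE A (Python) =====
-- from collections import defaultdict
--
-- def build_children_and_postorder(parent: dict, root: str):
--     children = defaultdict(list)
--     for node, p in parent.items():
--         if p is None:
--             continue
--         children[p].append(node)
--
--     post = []
--     stack = [(root, 0)]
--     while stack:
--         u, state = stack.pop()
--         if state == 0:
--             stack.append((u, 1))
--             for ch in children.get(u, []):
--                 stack.append((ch, 0))
--         else:
--             post.append(u)
--     return children, post
-- ===== SOURCE B (Python) =====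
-- from collections import defaultdict
--
-- def build_children_and_postorder(parent: dict, root: str):
--     # stage 1: collect (parent, child) pairs, then group them
--     children = defaultdict(list)
--     for p, node in ((p, n) for n, p in parent.items() if p is not None):
--         children[p].append(node)
--
--     # stage 2: recursive postorder; reversed() matches the stack's pop order,
--     # children.get avoids inserting leaf keys into the defaultdict
--     post = []
--     def visit(u):
--         for ch in reversed(children.get(u, [])):
--             visit(ch)
--         post.append(u)
--     visit(root)
--     return children, post
-- ===== Notes on version B (the rewrite author's own statement) =====
-- stated objective: alternative
-- what changed: Replaces A's explicit two-state (node,state) stack machine with a recursive postorder helper visit(u) that recurses over reversed(children.get(u, [])) and appends u, and builds the children map by first extracting (parent, child) pairs and then grouping them; Pre_ excludes parent maps whose parent-pointer chain from root returns to root, on which A loops forever and returns nothing.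
import Mathlib
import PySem

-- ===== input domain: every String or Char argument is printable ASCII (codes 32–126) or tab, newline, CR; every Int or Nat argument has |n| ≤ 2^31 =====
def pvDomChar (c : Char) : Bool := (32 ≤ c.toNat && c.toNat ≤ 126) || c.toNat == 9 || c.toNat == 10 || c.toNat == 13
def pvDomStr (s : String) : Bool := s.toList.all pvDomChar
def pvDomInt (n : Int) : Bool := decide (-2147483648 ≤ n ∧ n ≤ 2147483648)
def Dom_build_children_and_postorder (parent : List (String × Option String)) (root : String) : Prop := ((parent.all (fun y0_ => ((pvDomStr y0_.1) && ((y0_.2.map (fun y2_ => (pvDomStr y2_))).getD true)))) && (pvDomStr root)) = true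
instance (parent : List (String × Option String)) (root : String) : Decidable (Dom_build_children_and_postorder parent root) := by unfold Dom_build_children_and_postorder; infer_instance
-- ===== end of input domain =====

-- B replaces A's two-state (node,state) stack machine with a recursive postorder helper and
-- builds the children map by first extracting (parent, child) pairs and then grouping them.
-- pvBnd / the Nat fuel only make the loops total in Lean; they are never exhausted under Pre_.
def pvBnd (n : Nat) : Nat → Nat
  | 0 => 0
  | f + 1 => 1 + n * pvBnd n f

-- ===== PORT A =====
def pvChildrenA (parent : List (String × Option String)) : PySem.Dict String (List String) :=
  parent.foldl (fun d kv =>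
    match kv.2 with
    | none => d
    | some p => d.modify p [] (fun l => l ++ [kv.1])) PySem.Dict.empty

def pvLoopA (ch : PySem.Dict String (List String)) :
    Nat → List (String × Nat) → List String → List String
  | _, [], post => post
  | 0, _ :: _, post => post
  | f + 1, (u, s) :: rest, post =>
    if s = 0 then
      pvLoopA ch f ((ch.getD u []).foldl (fun st c => (c, 0) :: st) ((u, 1) :: rest)) post
    else
      pvLoopA ch f rest (post ++ [u])

def build_children_and_postorder (parent : List (String × Option String)) (root : String) :
    (List (String × List String)) × List String :=
  let ch := pvChildrenA parent
  (ch.items, pvLoopA ch (2 * pvBnd parent.length (parent.length + 1) + 2) [(root, 0)] [])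

-- ===== PORT B =====
def pvChildrenB (parent : List (String × Option String)) : PySem.Dict String (List String) :=
  (parent.filterMap (fun kv => kv.2.map (fun p => (p, kv.1)))).foldl
    (fun d q => d.modify q.1 [] (fun l => l ++ [q.2])) PySem.Dict.empty

-- recursive visit(u): recurse over the reversed child list, then emit u
def pvVisit (ch : PySem.Dict String (List String)) : Nat → String → List String
  | 0, _ => []
  | f + 1, u => ((ch.getD u []).reverse.map (pvVisit ch f)).flatten ++ [u]

def build_children_and_postorder_alt (parent : List (String × Option String)) (root : String) :
    (List (String × List String)) × List String :=
  let ch := pvChildrenB parent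
  (ch.items, pvVisit ch (parent.length + 1) root)

-- ===== PRECONDITION & SPEC =====
def pvStep (parent : List (String × Option String)) : Option String → Option String
  | none => none
  | some u => ((PySem.Dict.mk parent).get? u).join

def pvChain (parent : List (String × Option String)) (m : Nat) (root : String) : Option String :=
  (pvStep parent)^[m] (some root)

-- Pre_ excludes inputs on which the Python A never returns: parent maps with duplicate keys
-- (impossible for a Python dict) and parent maps whose parent-pointer chain starting at root
-- comes back to root (root lies on a cycle), on which A's while loop runs forever.
def Pre_build_children_and_postorder (parent : List (String × Option String)) (root : String) : Prop :=
  (parent.map Prod.fst).Nodup ∧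
  ∀ m, m < parent.length + 1 → 1 ≤ m → pvChain parent m root ≠ some root

instance (parent : List (String × Option String)) (root : String) :
    Decidable (Pre_build_children_and_postorder parent root) := by
  unfold Pre_build_children_and_postorder; infer_instance

def pvWitness_build_children_and_postorder : (List (String × Option String)) × String :=
  ([("a", some "r"), ("b", some "a"), ("c", none)], "r")

def Spec_build_children_and_postorder (parent : List (String × Option String)) (root : String) (out : (List (String × List String)) × List String) : Prop := out = build_children_and_postorder_alt parent root
instance (parent : List (String × Option String)) (root : String) (out : (List (String × List String)) × List String) : Decidable (Spec_build_children_and_postorder parent root out) := by unfold Spec_build_children_and_postorder; infer_instance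

-- ===== CLAIM (what is proved, stated in full; the proofs are below) =====
def Claim_equal_build_children_and_postorder : Prop := ∀ (parent : List (String × Option String)) (root : String), Dom_build_children_and_postorder parent root → Pre_build_children_and_postorder parent root → Spec_build_children_and_postorder parent root (build_children_and_postorder parent root)

-- ===== LEMMAS AND PROOFS =====

-- the (parent, child) pairs grouped by both builds
def pvPairs (parent : List (String × Option String)) : List (String × String) :=
  parent.filterMap (fun kv => kv.2.map (fun p => (p, kv.1)))

theorem pvChildrenA_eq_pairs_foldl (parent : List (String × Option String)) :
    pvChildrenA parent =
      (pvPairs parent).foldl (fun d q => d.modify q.1 [] (fun l => l ++ [q.2]))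
        PySem.Dict.empty := by
  unfold pvChildrenA pvPairs
  generalize (PySem.Dict.empty : PySem.Dict String (List String)) = d
  induction parent generalizing d with
  | nil => rfl
  | cons kv t ih =>
    rcases kv with ⟨n, _ | p⟩ <;> simp [ih]

-- the two builds of the children map coincide
theorem pvChildren_eq (parent : List (String × Option String)) :
    pvChildrenB parent = pvChildrenA parent :=
  (pvChildrenA_eq_pairs_foldl parent).symm

theorem pvGetD_children (parent : List (String × Option String)) (u : String) :
    (pvChildrenA parent).getD u [] =
      ((pvPairs parent).filter (fun q => q.1 == u)).map (·.2) := by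
  rw [pvChildrenA_eq_pairs_foldl]
  simpa using PySem.Dict.getD_foldl_modify_append (pvPairs parent) PySem.Dict.empty u

theorem pvMem_children (parent : List (String × Option String)) (u c : String) :
    c ∈ (pvChildrenA parent).getD u [] ↔ (c, some u) ∈ parent := by
  rw [pvGetD_children]
  simp only [List.mem_map, List.mem_filter, pvPairs, List.mem_filterMap, Option.map_eq_some_iff,
    beq_iff_eq]
  constructor
  · rintro ⟨⟨p, x⟩, ⟨⟨⟨k, v⟩, hkv, q, hq, heq⟩, hpu⟩, rfl⟩
    obtain ⟨rfl, rfl⟩ := Prod.mk.injEq .. ▸ heq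
    subst hpu hq
    exact hkv
  · intro h
    exact ⟨(u, c), ⟨⟨(c, some u), h, u, rfl, rfl⟩, rfl⟩, rfl⟩

theorem pvLen_children (parent : List (String × Option String)) (u : String) :
    ((pvChildrenA parent).getD u []).length ≤ parent.length := by
  rw [pvGetD_children, List.length_map]
  calc ((pvPairs parent).filter (fun q => q.1 == u)).length ≤ (pvPairs parent).length :=
        List.length_filter_le _ _
    _ ≤ parent.length := List.length_filterMap_le _ _

-- fuel sufficiency predicate: the children tree below u has depth < f
def pvOk (ch : PySem.Dict String (List String)) : Nat → String → Bool
  | 0, _ => false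
  | f + 1, u => (ch.getD u []).all (pvOk ch f)

-- reference traversal: the preorder below u (fuel-truncated; total under pvOk)
def pvT (ch : PySem.Dict String (List String)) : Nat → String → List String
  | 0, _ => []
  | f + 1, u => u :: ((ch.getD u []).map (pvT ch f)).flatten

theorem pvLoopA_nil (ch : PySem.Dict String (List String)) (f : Nat) (post : List String) :
    pvLoopA ch f [] post = post := by cases f <;> rfl

theorem pvPush_cons (l : List String) (st : List (String × Nat)) :
    l.foldl (fun st c => (c, 0) :: st) st = l.reverse.map (fun c => (c, 0)) ++ st := by
  induction l generalizing st with
  | nil => rfl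
  | cons c t ih => simp [List.foldl_cons, ih]

theorem pvSimA (ch : PySem.Dict String (List String)) :
    ∀ f u, pvOk ch f u = true → ∀ S post fA,
      pvLoopA ch (2 * (pvT ch f u).length + fA) ((u, 0) :: S) post =
        pvLoopA ch fA S (post ++ (pvT ch f u).reverse) := by
  intro f
  induction f with
  | zero => intro u h; simp [pvOk] at h
  | succ f ih =>
    intro u hok S post fA
    simp only [pvOk, List.all_eq_true] at hok
    have aux : ∀ ls : List String, (∀ c ∈ ls, pvOk ch f c = true) → ∀ S post fA,
        pvLoopA ch (2 * (ls.map (fun c => (pvT ch f c).length)).sum + fA)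
            (ls.map (fun c => (c, 0)) ++ S) post =
          pvLoopA ch fA S (post ++ (ls.map (fun c => (pvT ch f c).reverse)).flatten) := by
      intro ls
      induction ls with
      | nil => intro _ S post fA; simp
      | cons c t iht =>
        intro hls S post fA
        have h1 : 2 * ((List.map (fun c => (pvT ch f c).length) (c :: t)).sum) + fA =
            2 * (pvT ch f c).length + (2 * (t.map (fun c => (pvT ch f c).length)).sum + fA) := by
          simp [List.map_cons]; ring
        rw [h1]
        simp only [List.map_cons, List.cons_append]
        rw [ih c (hls c (by simp)) _ post _]
        rw [iht (fun c hc => hls c (by simp [hc])) S _ fA]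
        simp [List.flatten_cons]
    have hlen : (pvT ch (f + 1) u).length =
        ((ch.getD u []).map (fun c => (pvT ch f c).length)).sum + 1 := by
      simp [pvT, List.length_flatten, Function.comp_def]
    have hfuel : 2 * (pvT ch (f + 1) u).length + fA =
        (2 * (((ch.getD u []).reverse.map (fun c => (pvT ch f c).length)).sum) + (fA + 1)) + 1 := by
      rw [hlen]
      simp only [List.map_reverse, List.sum_reverse]
      ring
    rw [hfuel]
    simp only [pvLoopA]
    rw [pvPush_cons]
    rw [aux _ (fun c hc => hok c (by simpa using hc)) ((u, 1) :: S) post (fA + 1)]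
    simp only [pvLoopA, if_neg (by omega : ¬ (1 = 0))]
    have : ((ch.getD u []).map (pvT ch f)).flatten.reverse =
        ((ch.getD u []).reverse.map (fun c => (pvT ch f c).reverse)).flatten := by
      simp [List.reverse_flatten, List.map_map, List.map_reverse, Function.comp_def]
    simp [pvT, List.reverse_cons, this, List.append_assoc]

-- B's recursive visit produces the reverse of the preorder pvT (under sufficient fuel)
theorem pvVisit_eq (ch : PySem.Dict String (List String)) :
    ∀ f u, pvOk ch f u = true → pvVisit ch f u = (pvT ch f u).reverse := by
  intro f
  induction f with
  | zero => intro u h; simp [pvOk] at h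
  | succ f ih =>
    intro u hok
    simp only [pvOk, List.all_eq_true] at hok
    have hmap : (ch.getD u []).reverse.map (pvVisit ch f) =
        (ch.getD u []).reverse.map (fun c => (pvT ch f c).reverse) := by
      apply List.map_congr_left
      intro c hc
      exact ih c (hok c (by simpa using hc))
    have hjoin : ((ch.getD u []).map (pvT ch f)).flatten.reverse =
        ((ch.getD u []).reverse.map (fun c => (pvT ch f c).reverse)).flatten := by
      simp [List.reverse_flatten, List.map_map, List.map_reverse, Function.comp_def]
    simp [pvVisit, pvT, hmap, List.reverse_cons, hjoin]

theorem pvCost_le (ch : PySem.Dict String (List String)) (n : Nat)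
    (hb : ∀ u, (ch.getD u []).length ≤ n) :
    ∀ f u, (pvT ch f u).length ≤ pvBnd n f := by
  intro f
  induction f with
  | zero => intro u; simp [pvT, pvBnd]
  | succ f ih =>
    intro u
    have hsum : ((ch.getD u []).map (fun c => (pvT ch f c).length)).sum ≤
        (ch.getD u []).length * pvBnd n f := by
      have := List.sum_le_card_nsmul ((ch.getD u []).map (fun c => (pvT ch f c).length))
        (pvBnd n f) (by intro x hx; rcases List.mem_map.mp hx with ⟨c, _, rfl⟩; exact ih c)
      simpa [smul_eq_mul] using this
    have : (pvT ch (f + 1) u).length =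
        ((ch.getD u []).map (fun c => (pvT ch f c).length)).sum + 1 := by
      simp [pvT, List.length_flatten, Function.comp_def]
    rw [this]
    have h2 : (ch.getD u []).length * pvBnd n f ≤ n * pvBnd n f :=
      Nat.mul_le_mul_right _ (hb u)
    simp only [pvBnd]
    omega

-- a failing fuel check yields a descending chain of children links of that length
def pvChainDown (ch : PySem.Dict String (List String)) : String → List String → Prop
  | _, [] => True
  | u, c :: t => c ∈ ch.getD u [] ∧ pvChainDown ch c t

theorem pvNotOk (ch : PySem.Dict String (List String)) :
    ∀ f u, pvOk ch f u = false → ∃ l, l.length = f ∧ pvChainDown ch u l := by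
  intro f
  induction f with
  | zero => intro u _; exact ⟨[], rfl, trivial⟩
  | succ f ih =>
    intro u h
    simp only [pvOk, List.all_eq_false] at h
    rcases h with ⟨c, hc, hcf⟩
    rcases ih c (by simpa using hcf) with ⟨l, hl, hcd⟩
    exact ⟨c :: l, by simp [hl], hc, hcd⟩

theorem pvLinks (parent : List (String × Option String)) :
    ∀ (l : List String) (u : String), pvChainDown (pvChildrenA parent) u l →
      ∀ i (h : i + 1 < (u :: l).length),
        ((u :: l)[i + 1], some ((u :: l)[i]'(by omega))) ∈ parent := by
  intro l
  induction l with
  | nil => intro u _ i h; simp at h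
  | cons c t ih =>
    intro u hcd i h
    rcases hcd with ⟨hc, ht⟩
    cases i with
    | zero => simpa using (pvMem_children parent u c).mp hc
    | succ k =>
      have h' : k + 1 < (c :: t).length := by simpa using h
      simpa using ih c ht k h'

theorem pvGetQ (parent : List (String × Option String))
    (hnd : (parent.map Prod.fst).Nodup) {c p : String} (h : (c, some p) ∈ parent) :
    (PySem.Dict.mk parent).get? c = some (some p) :=
  PySem.Dict.get?_of_mem_items (d := PySem.Dict.mk parent) h (by simpa [PySem.Dict.keys] using hnd)

theorem pvOkRoot (parent : List (String × Option String)) (root : String)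
    (hpre : Pre_build_children_and_postorder parent root) :
    pvOk (pvChildrenA parent) (parent.length + 1) root = true := by
  rcases hpre with ⟨hnd, hchain⟩
  by_contra hok
  have hok' : pvOk (pvChildrenA parent) (parent.length + 1) root = false := by
    cases h : pvOk (pvChildrenA parent) (parent.length + 1) root
    · rfl
    · exact absurd h hok
  rcases pvNotOk _ _ _ hok' with ⟨l, hl, hcd⟩
  set L := root :: l with hL
  have hLlen : L.length = parent.length + 2 := by simp [hL, hl]
  have hlink : ∀ i (h : i + 1 < L.length),
      (L[i + 1], some (L[i]'(by omega))) ∈ parent := pvLinks parent l root hcd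
  -- every element of l is a key of parent; pigeonhole gives a repeated element
  have hsub : ∀ x ∈ l, x ∈ parent.map Prod.fst := by
    intro x hx
    rcases List.mem_iff_getElem.mp hx with ⟨i, hi, rfl⟩
    have h1 : i + 1 < L.length := by simp [hL]; omega
    have := hlink i h1
    have hx' : L[i + 1] = l[i] := by simp [hL]
    rw [hx'] at this
    exact List.mem_map.mpr ⟨(l[i], some (L[i]'(by omega))), this, rfl⟩
  have hnotnodup : ¬ l.Nodup := by
    intro hnod
    have h1 : l.length = l.toFinset.card := (List.toFinset_card_of_nodup hnod).symm
    have h2 : l.toFinset ⊆ (parent.map Prod.fst).toFinset := by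
      intro x hx
      exact List.mem_toFinset.mpr (hsub x (List.mem_toFinset.mp hx))
    have h3 : l.toFinset.card ≤ (parent.map Prod.fst).toFinset.card := Finset.card_le_card h2
    have h4 : (parent.map Prod.fst).toFinset.card ≤ parent.length := by
      simpa using (parent.map Prod.fst).toFinset_card_le
    omega
  -- extract two equal entries of l
  rcases List.exists_duplicate_iff_not_nodup.mpr hnotnodup with ⟨x, hdup⟩
  rcases List.duplicate_iff_exists_distinct_get.mp hdup with ⟨i, j, hij, hi, hj⟩
  have hil : (i : Nat) < l.length := i.isLt
  have hjl : (j : Nat) < l.length := j.isLt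
  have hijn : (i : Nat) < (j : Nat) := hij
  -- the same equality, as indices into L (shifted by one)
  have hijL : L[(i : Nat) + 1]'(by rw [hLlen]; omega) = L[(j : Nat) + 1]'(by rw [hLlen]; omega) := by
    have h1 : L[(i : Nat) + 1]'(by rw [hLlen]; omega) = l[(i : Nat)] := by simp [hL]
    have h2 : L[(j : Nat) + 1]'(by rw [hLlen]; omega) = l[(j : Nat)] := by simp [hL]
    rw [h1, h2, ← List.get_eq_getElem, ← List.get_eq_getElem, ← hi, ← hj]
  -- functionality of the parent lookup: equal nodes have equal parents
  have hfun : ∀ a b (ha : a + 1 < L.length) (hb : b + 1 < L.length),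
      L[a + 1] = L[b + 1] → L[a]'(by omega) = L[b]'(by omega) := by
    intro a b ha hb hab
    have g1 := pvGetQ parent hnd (hlink a ha)
    have g2 := pvGetQ parent hnd (hlink b hb)
    rw [hab, g2] at g1
    simpa using g1.symm
  -- walk the equality back to index 0
  have hback : ∀ d, d ≤ (i : Nat) + 1 →
      L[(i : Nat) + 1 - d]'(by rw [hLlen]; omega) = L[(j : Nat) + 1 - d]'(by rw [hLlen]; omega) := by
    intro d
    induction d with
    | zero => intro _; exact hijL
    | succ d ihd =>
      intro hd
      have hprev := ihd (by omega)
      have e1 : (i : Nat) + 1 - d = ((i : Nat) - d) + 1 := by omega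
      have e2 : (j : Nat) + 1 - d = ((j : Nat) - d) + 1 := by omega
      have hprev' : L[((i : Nat) - d) + 1]'(by rw [hLlen]; omega) =
          L[((j : Nat) - d) + 1]'(by rw [hLlen]; omega) := by
        rw [← getElem_congr_idx e1, ← getElem_congr_idx e2]
        exact hprev
      have hstep := hfun ((i : Nat) - d) ((j : Nat) - d)
        (by rw [hLlen]; omega) (by rw [hLlen]; omega) hprev'
      have e3 : (i : Nat) + 1 - (d + 1) = (i : Nat) - d := by omega
      have e4 : (j : Nat) + 1 - (d + 1) = (j : Nat) - d := by omega
      rw [getElem_congr_idx e3, getElem_congr_idx e4]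
      exact hstep
  set k := (j : Nat) - (i : Nat) with hk
  have hk1 : 1 ≤ k := by omega
  have hkn : k ≤ parent.length := by omega
  -- root recurs at position k of L
  have hroot : L[k]'(by rw [hLlen]; omega) = root := by
    have h0 := hback ((i : Nat) + 1) le_rfl
    have e1 : (i : Nat) + 1 - ((i : Nat) + 1) = 0 := by omega
    have e2 : (j : Nat) + 1 - ((i : Nat) + 1) = k := by omega
    rw [getElem_congr_idx e1, getElem_congr_idx e2] at h0
    rw [← h0]
    simp [hL]
  -- follow the parent chain forward from root back to root
  have hfwd : ∀ m, m ≤ k → pvChain parent m root = some (L[k - m]'(by rw [hLlen]; omega)) := by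
    intro m
    induction m with
    | zero =>
      intro _
      simp only [pvChain, Function.iterate_zero, id_eq, Nat.sub_zero]
      exact congrArg some hroot.symm
    | succ m ihm =>
      intro hm
      have hprev := ihm (by omega)
      have hstep : pvChain parent (m + 1) root = pvStep parent (pvChain parent m root) := by
        simp [pvChain, Function.iterate_succ_apply']
      rw [hstep, hprev]
      have e1 : k - m = (k - (m + 1)) + 1 := by omega
      have hg := pvGetQ parent hnd (hlink (k - (m + 1)) (by rw [hLlen]; omega))
      rw [getElem_congr_idx e1]
      simp [pvStep, hg]
  have hcontr := hfwd k le_rfl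
  rw [getElem_congr_idx (by omega : k - k = 0)] at hcontr
  have hfin : pvChain parent k root = some root := by
    rw [hcontr]
    exact congrArg some (by simp [hL])
  exact hchain k (by omega) hk1 hfin

-- ===== VERDICT (by name: the statement is the Claim_ definition above) =====
theorem build_children_and_postorder_spec : Claim_equal_build_children_and_postorder := by
  intro parent root _hdom hpre
  unfold Spec_build_children_and_postorder
  unfold build_children_and_postorder build_children_and_postorder_alt
  rw [pvChildren_eq]
  set ch := pvChildrenA parent with hch
  set n := parent.length with hn
  have hok : pvOk ch (n + 1) root = true := pvOkRoot parent root hpre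
  have hb : ∀ u, (ch.getD u []).length ≤ n := fun u => pvLen_children parent u
  have hC : (pvT ch (n + 1) root).length ≤ pvBnd n (n + 1) := pvCost_le ch n hb (n + 1) root
  -- A's loop
  have hfa : 2 * pvBnd n (n + 1) + 2 =
      2 * (pvT ch (n + 1) root).length + (2 * (pvBnd n (n + 1) - (pvT ch (n + 1) root).length) + 2) := by
    omega
  have hA : pvLoopA ch (2 * pvBnd n (n + 1) + 2) [(root, 0)] [] = (pvT ch (n + 1) root).reverse := by
    rw [hfa, pvSimA ch (n + 1) root hok [] [] _, pvLoopA_nil]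
    simp
  -- B's recursion
  have hB : pvVisit ch (n + 1) root = (pvT ch (n + 1) root).reverse := pvVisit_eq ch (n + 1) root hok
  simp only [hA, hB]
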